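-- pv_equiv track=rewrite | github.com/microsoft/NeuralSpeech | LightSpeech/utils/world_utils.py | generate_all_arch
-- ===== SOURCE A (Python) =====
-- def generate_all_arch(layers, candidate_ops):
--     res = []
--     num_ops = len(candidate_ops)
--     def dfs(cur_arch, layer_id):
--         if layer_id == layers:
--             res.append(cur_arch)
--             return
--         for op in range(num_ops):
--             dfs(cur_arch+[candidate_ops[op]], layer_id+1)
--     dfs([], 0)
--     return res
-- ===== SOURCE B (Python) =====
-- def generate_all_arch(layers, candidate_ops):
--     res = [[]]
--     for _ in range(layers):
--         res = [arch + [op] for arch in res for op in candidate_ops]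
--     return res
-- ===== Notes on version B (the rewrite author's own statement) =====
-- stated objective: simpler
-- what changed: Replaces the recursive DFS with a mutable result list by an iterative bottom-up product build: start from [[]] and, once per layer, extend every partial architecture by each candidate op, preserving the most-significant-first order.
-- outside the precondition, e.g. on generate_all_arch(-1, []): A returns [], B returns [[]]
import Mathlib
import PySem

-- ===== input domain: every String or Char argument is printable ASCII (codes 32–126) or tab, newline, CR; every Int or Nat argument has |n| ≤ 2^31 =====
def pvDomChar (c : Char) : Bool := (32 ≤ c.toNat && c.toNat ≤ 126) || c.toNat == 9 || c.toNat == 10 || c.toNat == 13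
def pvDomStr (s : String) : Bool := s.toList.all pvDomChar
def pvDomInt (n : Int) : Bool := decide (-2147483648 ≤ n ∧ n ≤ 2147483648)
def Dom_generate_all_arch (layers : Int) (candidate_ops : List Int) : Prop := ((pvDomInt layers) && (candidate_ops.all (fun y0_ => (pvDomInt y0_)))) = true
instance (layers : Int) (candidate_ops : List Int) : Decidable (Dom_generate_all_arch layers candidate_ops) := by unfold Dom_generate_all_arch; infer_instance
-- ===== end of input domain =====

-- B replaces A's recursive DFS by an iterative bottom-up product build (objective: simpler).

-- ===== PORT A =====
-- dfs, with the closure-mutated `res` threaded as an accumulator; the fuel argument only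
-- makes the recursion total (Python diverges where it would run out, outside Pre_).
def dfsA (layers : Int) (ops : List Int) : Nat → List Int → Int → List (List Int) → List (List Int)
  | fuel, cur_arch, layer_id, res =>
    if layer_id = layers then res ++ [cur_arch]
    else match fuel with
      | 0 => res
      | fuel + 1 =>
        (PySem.List.pyRange 0 (PySem.List.len ops) 1).foldl
          (fun r op => dfsA layers ops fuel (cur_arch ++ [PySem.List.pyGetD ops op 0]) (layer_id + 1) r) res

def generate_all_arch (layers : Int) (candidate_ops : List Int) : List (List Int) :=
  dfsA layers candidate_ops layers.toNat [] 0 []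

-- ===== PORT B =====
def generate_all_arch_alt (layers : Int) (candidate_ops : List Int) : List (List Int) :=
  (List.range layers.toNat).foldl
    (fun res _ => res.flatMap (fun arch => candidate_ops.map (fun op => arch ++ [op]))) [[]]

-- ===== PRECONDITION & SPEC =====
-- Pre_ excludes negative `layers` (outside the natural domain of a layer count): there A
-- overflows the recursion stack (RecursionError) whenever candidate_ops is nonempty, and
-- returns [] for empty candidate_ops only as an accident of the loop guard, while B returns [[]].
def Pre_generate_all_arch (layers : Int) (candidate_ops : List Int) : Prop := 0 ≤ layers
instance (layers : Int) (candidate_ops : List Int) : Decidable (Pre_generate_all_arch layers candidate_ops) := by unfold Pre_generate_all_arch; infer_instance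
def pvWitness_generate_all_arch : Int × List Int := (2, [3, 7])

def Spec_generate_all_arch (layers : Int) (candidate_ops : List Int) (out : List (List Int)) : Prop := out = generate_all_arch_alt layers candidate_ops
instance (layers : Int) (candidate_ops : List Int) (out : List (List Int)) : Decidable (Spec_generate_all_arch layers candidate_ops out) := by unfold Spec_generate_all_arch; infer_instance

-- ===== CLAIM (what is proved, stated in full; the proofs are below) =====
def Claim_equal_generate_all_arch : Prop := ∀ (layers : Int) (candidate_ops : List Int), Dom_generate_all_arch layers candidate_ops → Pre_generate_all_arch layers candidate_ops → Spec_generate_all_arch layers candidate_ops (generate_all_arch layers candidate_ops)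

-- ===== LEMMAS AND PROOFS =====

-- all length-n sequences over ops, DFS (most-significant-first) order
def seqs (ops : List Int) : Nat → List (List Int)
  | 0 => [[]]
  | n + 1 => ops.flatMap (fun o => (seqs ops n).map (o :: ·))

def stepB (ops : List Int) (res : List (List Int)) : List (List Int) :=
  res.flatMap (fun arch => ops.map (fun op => arch ++ [op]))

lemma stepB_map_cons (ops : List Int) (o : Int) (l : List (List Int)) :
    stepB ops (l.map (o :: ·)) = (stepB ops l).map (o :: ·) := by
  simp [stepB, List.flatMap_map, List.map_flatMap, Function.comp_def]

lemma stepB_seqs (ops : List Int) : ∀ n, stepB ops (seqs ops n) = seqs ops (n + 1) := by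
  intro n
  induction n with
  | zero => simp [stepB, seqs]; induction ops <;> simp [List.flatMap_cons, *]
  | succ n ih =>
    show stepB ops (seqs ops (n + 1)) = seqs ops (n + 2)
    calc stepB ops (seqs ops (n + 1))
        = ops.flatMap (fun o => stepB ops ((seqs ops n).map (o :: ·))) := by
          simp [seqs, stepB, List.flatMap_assoc]
      _ = ops.flatMap (fun o => (stepB ops (seqs ops n)).map (o :: ·)) := by
          simp only [stepB_map_cons]
      _ = seqs ops (n + 2) := by rw [ih]; rfl

lemma dfsA_eq (layers : Int) (ops : List Int) :
    ∀ (n fuel : Nat), n ≤ fuel → ∀ (layer_id : Int) (cur_arch : List Int) (res : List (List Int)),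
      layer_id + n = layers →
      dfsA layers ops fuel cur_arch layer_id res = res ++ (seqs ops n).map (cur_arch ++ ·) := by
  intro n
  induction n with
  | zero =>
    intro fuel _ layer_id cur_arch res hn
    have : layer_id = layers := by omega
    subst this
    rw [dfsA.eq_def]
    simp [seqs]
  | succ n ih =>
    intro fuel hfuel layer_id cur_arch res hn
    have hne : layer_id ≠ layers := by omega
    obtain ⟨fuel, rfl⟩ : ∃ f, fuel = f + 1 := ⟨fuel - 1, by omega⟩
    rw [dfsA]
    simp only [if_neg hne]
    rw [(PySem.List.foldl_pyRange_pyGetD (a := 0) (xs := ops) (d := 0)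
      (f := fun r v => dfsA layers ops fuel (cur_arch ++ [v]) (layer_id + 1) r)
      (init := res) (by omega) : _)]
    simp only [Int.toNat_zero, List.drop_zero]
    have key : ∀ (l : List Int) (acc : List (List Int)),
        l.foldl (fun r op => dfsA layers ops fuel (cur_arch ++ [op]) (layer_id + 1) r) acc
          = acc ++ l.flatMap (fun o => (seqs ops n).map ((cur_arch ++ [o]) ++ ·)) := by
      intro l
      induction l with
      | nil => simp
      | cons o l ihl =>
        intro acc
        rw [List.foldl_cons, ih fuel (by omega) (layer_id + 1) (cur_arch ++ [o]) acc (by omega),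
          ihl]
        simp [List.flatMap_cons]
    rw [key]
    congr 1
    show (ops.flatMap fun o => (seqs ops n).map ((cur_arch ++ [o]) ++ ·))
        = (seqs ops (n + 1)).map (cur_arch ++ ·)
    simp [seqs, List.map_flatMap, Function.comp_def]

lemma alt_eq_seqs (ops : List Int) : ∀ n : Nat,
    (List.range n).foldl (fun res _ => stepB ops res) [[]] = seqs ops n := by
  intro n
  induction n with
  | zero => rfl
  | succ n ih => rw [List.range_succ, List.foldl_append, ih, List.foldl_cons, List.foldl_nil,
      stepB_seqs]

-- ===== VERDICT (by name: the statement is the Claim_ definition above) =====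
theorem generate_all_arch_spec : Claim_equal_generate_all_arch := by
  intro layers ops _ hpre
  have h0 : (0:Int) ≤ layers := hpre
  show generate_all_arch layers ops = generate_all_arch_alt layers ops
  have hA := dfsA_eq layers ops layers.toNat layers.toNat le_rfl 0 [] [] (by omega)
  rw [generate_all_arch, hA, generate_all_arch_alt,
    show (fun res (_ : Nat) => res.flatMap (fun arch => ops.map (fun op => arch ++ [op])))
      = fun res _ => stepB ops res from rfl,
    alt_eq_seqs]
  simp
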